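-- pv_equiv track=rewrite | github.com/jfa320/modelos-tesina-ungs-lp | Position_generator.py | generatePositionsCidGarcia
-- ===== SOURCE A (Python) =====
-- def generatePositionsCidGarcia(W, H, wi, hi):
--     positions = []
--
--     # Ciclo externo en 'j' desde el ancho del ítem hasta el ancho del bin
--     for j in range(wi, W + 1):
--         # Ciclo en 'l' para iterar sobre posibles desplazamientos horizontales
--         for l in range(W):
--             if (j + l) <= W:  # Validación para asegurar que no se exceda el ancho del bin
--                 # Ciclo en 'i' desde la altura del ítem hasta la altura del bin
--                 for i in range(hi, H + 1):
--                     # Ciclo en 'k' para iterar sobre posibles desplazamientos verticales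
--                     for k in range(H):
--                         if (k + i) <= H:  # Validación para asegurar que no se exceda la altura del bin
--                             # Creación y etiquetado de una nueva posición (j - wi, i - hi) válida para el ítem
--                             positions.append((j - wi, i - hi))
--
--     # Eliminamos duplicados en caso de ser necesario
--     return list(set(positions))
-- ===== SOURCE B (Python) =====
-- def generatePositionsCidGarcia(W, H, wi, hi):
--     # A degenerate bin (W < 1 or H < 1) admits no placements at all.
--     if W < 1 or H < 1:
--         return []
--     # Every valid position is exactly (a, b) with 0 <= a <= W - wi and
--     # 0 <= b <= H - hi; generate each once and return them as list(set(..))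
--     # just as the original interface does.
--     return list(set((a, b) for a in range(W - wi + 1) for b in range(H - hi + 1)))
-- ===== Notes on version B (the rewrite author's own statement) =====
-- stated objective: simpler
-- what changed: Replaces the four nested loops, which append every position many times over redundant l/k offsets before deduplicating, by a direct double loop that generates each distinct position (a,b) with 0<=a<=W-wi, 0<=b<=H-hi exactly once (empty for a degenerate bin with W<1 or H<1), keeping the final list(set(..)) step.
import Mathlib
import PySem

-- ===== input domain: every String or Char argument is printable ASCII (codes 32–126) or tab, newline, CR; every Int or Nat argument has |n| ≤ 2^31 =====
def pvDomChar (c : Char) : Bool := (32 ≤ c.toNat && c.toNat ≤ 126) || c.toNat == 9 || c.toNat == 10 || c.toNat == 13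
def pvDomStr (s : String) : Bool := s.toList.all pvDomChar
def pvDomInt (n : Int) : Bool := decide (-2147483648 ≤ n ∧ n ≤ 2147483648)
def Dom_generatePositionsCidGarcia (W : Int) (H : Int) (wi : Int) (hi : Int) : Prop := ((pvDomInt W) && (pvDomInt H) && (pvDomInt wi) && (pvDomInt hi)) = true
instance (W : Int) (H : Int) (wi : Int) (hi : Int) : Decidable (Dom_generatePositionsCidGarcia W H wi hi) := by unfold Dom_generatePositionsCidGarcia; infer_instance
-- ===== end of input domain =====

-- B replaces A's four nested loops (which emit every position many times) by a
-- direct double loop generating each distinct position once (objective: simpler).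


-- ===== PORT A =====
-- literal transliteration of A: four nested range-loops appending (j-wi, i-hi),
-- then list(set(positions)) = PySem.Set.ofList (first occurrences, in order)
def generatePositionsCidGarcia (W : Int) (H : Int) (wi : Int) (hi : Int) : List (Int × Int) :=
  let positions : List (Int × Int) :=
    (PySem.List.pyRange wi (W + 1)).foldl (fun acc j =>
      (PySem.List.pyRange 0 W).foldl (fun acc l =>
        if j + l ≤ W then
          (PySem.List.pyRange hi (H + 1)).foldl (fun acc i =>
            (PySem.List.pyRange 0 H).foldl (fun acc k =>
              if k + i ≤ H then acc ++ [(j - wi, i - hi)] else acc) acc) acc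
        else acc) acc) []
  PySem.Set.ofList positions

-- ===== PORT B =====
-- transliteration of B: guard for a degenerate bin, then one double
-- comprehension fed to set(..) (= PySem.Set.ofList) and listed
def generatePositionsCidGarcia_alt (W : Int) (H : Int) (wi : Int) (hi : Int) : List (Int × Int) :=
  if W < 1 ∨ H < 1 then []
  else PySem.Set.ofList ((PySem.List.pyRange 0 (W - wi + 1)).flatMap (fun a =>
         (PySem.List.pyRange 0 (H - hi + 1)).map (fun b => (a, b))))

-- ===== PRECONDITION & SPEC =====
def Spec_generatePositionsCidGarcia (W : Int) (H : Int) (wi : Int) (hi : Int) (out : List (Int × Int)) : Prop := out = generatePositionsCidGarcia_alt W H wi hi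
instance (W : Int) (H : Int) (wi : Int) (hi : Int) (out : List (Int × Int)) : Decidable (Spec_generatePositionsCidGarcia W H wi hi out) := by unfold Spec_generatePositionsCidGarcia; infer_instance

-- ===== CLAIM (what is proved, stated in full; the proofs are below) =====
def Claim_equal_generatePositionsCidGarcia : Prop := ∀ (W : Int) (H : Int) (wi : Int) (hi : Int), Dom_generatePositionsCidGarcia W H wi hi → Spec_generatePositionsCidGarcia W H wi hi (generatePositionsCidGarcia W H wi hi)

-- ===== LEMMAS AND PROOFS =====

-- 'if c: out += X' pointwise rewriting
theorem pvIteAppend {β : Type} (c : Prop) [Decidable c] (acc X : List β) :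
    (if c then acc ++ X else acc) = acc ++ (if c then X else []) := by
  split <;> simp

-- folding over a flatMap = nested fold
theorem pvFoldlFlatMap {α β γ : Type} (f : γ → β → γ) (g : α → List β) (l : List α) (s : γ) :
    (l.flatMap g).foldl f s = l.foldl (fun s x => (g x).foldl f s) s := by
  induction l generalizing s with
  | nil => rfl
  | cons a t ih => simp [List.flatMap_cons, List.foldl_append, ih]

theorem pvMemFoldlAdd {α : Type} [BEq α] [LawfulBEq α] (xs : List α) (s : PySem.Set α) (y : α) :
    y ∈ xs.foldl PySem.Set.add s ↔ y ∈ s ∨ y ∈ xs := by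
  induction xs generalizing s with
  | nil => simp
  | cons a t ih =>
    rw [List.foldl_cons, ih]
    simp [PySem.Set.mem_add]
    tauto

-- adding elements already present changes nothing
theorem pvFoldlAddFix {α : Type} [BEq α] [LawfulBEq α] (xs : List α) (s : PySem.Set α)
    (h : ∀ x ∈ xs, x ∈ s) : xs.foldl PySem.Set.add s = s := by
  induction xs with
  | nil => rfl
  | cons a t ih =>
    rw [List.foldl_cons, PySem.Set.add_of_mem (h a (by simp))]
    exact ih (fun x hx => h x (by simp [hx]))

-- adding fresh pairwise-distinct elements appends them in order
theorem pvFoldlAddNodup {α : Type} [BEq α] [LawfulBEq α] (xs : List α) (s : PySem.Set α)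
    (hn : xs.Nodup) (hd : ∀ x ∈ xs, x ∉ s) : xs.foldl PySem.Set.add s = s ++ xs := by
  induction xs generalizing s with
  | nil => simp
  | cons a t ih =>
    rw [List.foldl_cons]
    have ha : a ∉ s := hd a (by simp)
    have hadd : PySem.Set.add s a = s ++ [a] := by
      unfold PySem.Set.add
      rw [if_neg (by intro hc; exact ha ((PySem.Set.contains_iff s a).1 hc))]
    rw [hadd, ih (s ++ [a]) hn.of_cons ?_]
    · simp
    · intro x hx
      have hxa : x ≠ a := by
        intro he; subst he
        exact (List.nodup_cons.1 hn).1 hx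
      simp [List.mem_append, hxa]
      exact hd x (by simp [hx])

theorem pvPyRangeMapAdd (a b c : Int) :
    (PySem.List.pyRange a b).map (fun x => x + c) = PySem.List.pyRange (a + c) (b + c) := by
  generalize hn : (b - a).toNat = n
  induction n generalizing a with
  | zero =>
    rw [PySem.List.pyRange_one_eq_nil (by omega), PySem.List.pyRange_one_eq_nil (by omega)]
    rfl
  | succ m ih =>
    rw [PySem.List.pyRange_one_cons (by omega), PySem.List.pyRange_one_cons (by omega : a + c < b + c)]
    rw [List.map_cons]
    have := ih (a + 1) (by omega)
    rw [show a + c + 1 = a + 1 + c by ring] at *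
    rw [this]

theorem pvNodupPyRange (a b : Int) : (PySem.List.pyRange a b).Nodup := by
  generalize hn : (b - a).toNat = n
  induction n generalizing a with
  | zero => rw [PySem.List.pyRange_one_eq_nil (by omega)]; exact List.nodup_nil
  | succ m ih =>
    rw [PySem.List.pyRange_one_cons (by omega)]
    refine List.nodup_cons.2 ⟨?_, ih (a + 1) (by omega)⟩
    intro hmem
    have := PySem.List.mem_pyRange_one.1 hmem
    omega


theorem pvFoldlConst {α β : Type} (l : List α) (s : β) :
    l.foldl (fun acc _ => acc) s = s := by
  induction l <;> simp_all


-- fold of a conditional branch whose else-arm is empty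
theorem pvFoldlIte {β γ : Type} (c : Prop) [Decidable c] (X : List β) (f : γ → β → γ) (s : γ) :
    (if c then X else []).foldl f s = if c then X.foldl f s else s := by
  split <;> rfl

-- repeatedly conditionally adding an element already present changes nothing
theorem pvFoldlCondAddFix {α : Type} [BEq α] [LawfulBEq α] (l : List Int) (p : Int → Prop)
    [DecidablePred p] (v : α) (s : PySem.Set α) (hv : v ∈ s) :
    l.foldl (fun s k => if p k then s.add v else s) s = s := by
  induction l with
  | nil => rfl
  | cons a t ih =>
    rw [List.foldl_cons]
    by_cases h : p a
    · rw [if_pos h, PySem.Set.add_of_mem hv]; exact ih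
    · rw [if_neg h]; exact ih

-- if at least one test passes, the conditional-add loop adds v exactly once
theorem pvFoldlCondAddConst {α : Type} [BEq α] [LawfulBEq α] (l : List Int) (p : Int → Prop)
    [DecidablePred p] (v : α) (s : PySem.Set α) (h : ∃ k ∈ l, p k) :
    l.foldl (fun s k => if p k then s.add v else s) s = s.add v := by
  induction l generalizing s with
  | nil => obtain ⟨k, hk, _⟩ := h; cases hk
  | cons a t ih =>
    rw [List.foldl_cons]
    by_cases hpa : p a
    · rw [if_pos hpa]
      exact pvFoldlCondAddFix t p v _ (by simp [PySem.Set.mem_add])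
    · rw [if_neg hpa]
      have h2 : ∃ k ∈ t, p k := by
        obtain ⟨k, hk, hpk⟩ := h
        rcases List.mem_cons.1 hk with rfl | hk'
        · exact absurd hpk hpa
        · exact ⟨k, hk', hpk⟩
      exact ih _ h2

-- re-folding a set of already-present elements, conditionally, changes nothing
theorem pvFoldlCondFoldFix {α : Type} [BEq α] [LawfulBEq α] (l : List Int) (q : Int → Prop)
    [DecidablePred q] (xs : List α) (s : PySem.Set α) (h : ∀ x ∈ xs, x ∈ s) :
    l.foldl (fun s k => if q k then xs.foldl PySem.Set.add s else s) s = s := by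
  induction l with
  | nil => rfl
  | cons a t ih =>
    rw [List.foldl_cons]
    by_cases hqa : q a
    · rw [if_pos hqa, pvFoldlAddFix xs s h]; exact ih
    · rw [if_neg hqa]; exact ih

-- adding a nodup family of rows to the empty set lists them in order
theorem pvFoldlAddRows {α : Type} [BEq α] [LawfulBEq α] (l : List Int) (f : Int → List α)
    (hn : (l.flatMap f).Nodup) :
    l.foldl (fun s j => (f j).foldl PySem.Set.add s) [] = l.flatMap f := by
  rw [← pvFoldlFlatMap PySem.Set.add f l []]
  simpa using pvFoldlAddNodup (l.flatMap f) [] hn (by simp)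

-- a duplicate-free list is its own set, in order
theorem pvOfListNodup {α : Type} [BEq α] [LawfulBEq α] (xs : List α) (hn : xs.Nodup) :
    PySem.Set.ofList xs = xs := by
  rw [PySem.Set.ofList_eq_foldl]
  simpa using pvFoldlAddNodup xs [] hn (by simp)

-- the central fact: A's value equals B's value, unconditionally
theorem pvMain (W H wi hi : Int) :
    generatePositionsCidGarcia W H wi hi = generatePositionsCidGarcia_alt W H wi hi := by
  unfold generatePositionsCidGarcia generatePositionsCidGarcia_alt
  by_cases hW : W < 1
  · rw [if_pos (Or.inl hW)]
    simp only [PySem.List.pyRange_one_eq_nil (show W ≤ (0:Int) by omega),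
      List.foldl_nil, pvFoldlConst]
    rfl
  · by_cases hH : H < 1
    · rw [if_pos (Or.inr hH)]
      simp only [PySem.List.pyRange_one_eq_nil (show H ≤ (0:Int) by omega),
        List.foldl_nil, ite_self, pvFoldlConst]
      rfl
    · rw [if_neg (by omega)]
      simp only [pvIteAppend, PySem.List.foldl_append_eq_flatMap, List.nil_append]
      rw [PySem.Set.ofList_eq_foldl]
      simp only [pvFoldlFlatMap, pvFoldlIte, List.foldl_cons, List.foldl_nil]
      -- per j, the (l,i,k) loops add row j = [(j-wi, i-hi) for i in range(hi, H+1)] once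
      have hinner : ∀ (s : PySem.Set (Int × Int)), ∀ j ∈ PySem.List.pyRange wi (W + 1),
          (PySem.List.pyRange 0 W).foldl (fun s l =>
            if j + l ≤ W then
              (PySem.List.pyRange hi (H + 1)).foldl (fun s i =>
                (PySem.List.pyRange 0 H).foldl (fun s k =>
                  if k + i ≤ H then s.add (j - wi, i - hi) else s) s) s
            else s) s
          = ((PySem.List.pyRange hi (H + 1)).map (fun i => (j - wi, i - hi))).foldl
              PySem.Set.add s := by
        intro s j hj
        have hjW : j ≤ W := by have := PySem.List.mem_pyRange_one.1 hj; omega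
        have hrow : ∀ (s : PySem.Set (Int × Int)),
            (PySem.List.pyRange hi (H + 1)).foldl (fun s i =>
              (PySem.List.pyRange 0 H).foldl (fun s k =>
                if k + i ≤ H then s.add (j - wi, i - hi) else s) s) s
            = ((PySem.List.pyRange hi (H + 1)).map (fun i => (j - wi, i - hi))).foldl
                PySem.Set.add s := by
          intro s
          rw [List.foldl_map]
          refine PySem.List.foldl_congr_mem _ _ _ _ ?_
          intro s i hi'
          have hiH : i ≤ H := by have := PySem.List.mem_pyRange_one.1 hi'; omega
          exact pvFoldlCondAddConst _ _ _ _
            ⟨0, PySem.List.mem_pyRange_one.2 ⟨le_refl 0, by omega⟩, by omega⟩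
        simp only [hrow]
        rw [PySem.List.pyRange_one_cons (show (0:Int) < W by omega), List.foldl_cons,
          if_pos (show j + 0 ≤ W by omega)]
        exact pvFoldlCondFoldFix _ _ _ _ (fun x hx => (pvMemFoldlAdd _ _ _).2 (Or.inr hx))
      refine Eq.trans (PySem.List.foldl_congr_mem _ _
        (fun s j => ((PySem.List.pyRange hi (H + 1)).map (fun i => (j - wi, i - hi))).foldl
          PySem.Set.add s) _ hinner) ?_
      -- the rows are pairwise disjoint and each is duplicate-free
      have hn : ((PySem.List.pyRange wi (W + 1)).flatMap
          (fun j => (PySem.List.pyRange hi (H + 1)).map (fun i => (j - wi, i - hi)))).Nodup := by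
        rw [List.nodup_flatMap]
        constructor
        · intro j _
          exact (pvNodupPyRange hi (H + 1)).map (fun i i' h => by
            simp only [Prod.mk.injEq] at h; omega)
        · refine (pvNodupPyRange wi (W + 1)).imp ?_
          intro j j' hne x hx hx'
          simp only [List.mem_map] at hx hx'
          obtain ⟨i, _, rfl⟩ := hx
          obtain ⟨i', _, he⟩ := hx'
          simp only [Prod.mk.injEq] at he
          omega
      -- shift both ranges to base 0
      have e1 : (PySem.List.pyRange wi (W + 1)).map (fun x => x + (-wi))
          = PySem.List.pyRange 0 (W - wi + 1) := by
        rw [pvPyRangeMapAdd, show wi + -wi = (0:Int) by ring,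
          show W + 1 + -wi = W - wi + 1 by ring]
      have e2 : (PySem.List.pyRange hi (H + 1)).map (fun x => x + (-hi))
          = PySem.List.pyRange 0 (H - hi + 1) := by
        rw [pvPyRangeMapAdd, show hi + -hi = (0:Int) by ring,
          show H + 1 + -hi = H - hi + 1 by ring]
      have hBig : (PySem.List.pyRange 0 (W - wi + 1)).flatMap (fun a =>
            (PySem.List.pyRange 0 (H - hi + 1)).map (fun b => (a, b)))
          = (PySem.List.pyRange wi (W + 1)).flatMap
              (fun j => (PySem.List.pyRange hi (H + 1)).map (fun i => (j - wi, i - hi))) := by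
        rw [← e1, ← e2]
        simp only [List.flatMap_map, List.map_map, Function.comp_def, sub_eq_add_neg]
      rw [hBig, pvOfListNodup _ hn]
      exact pvFoldlAddRows _ _ hn

-- ===== VERDICT (by name: the statement is the Claim_ definition above) =====
theorem generatePositionsCidGarcia_spec : Claim_equal_generatePositionsCidGarcia := by
  intro W H wi hi _
  unfold Spec_generatePositionsCidGarcia
  exact pvMain W H wi hi
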